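-- pv_equiv track=rewrite | github.com/viktoryest/stravascope | parser.py | find_needed_line_2
-- ===== SOURCE A (Python) =====
-- def find_needed_line_2(text):
--     inform_for_result = []
--     for i in text:
--         if '<title>' in i:
--             name = i.strip('<title>').strip('</')
--             inform_for_result.append(name)
--     for i in range(len(text)):
--         if "<span class='challenge-date'>" in text[i]:
--             date = text[i + 1]
--             inform_for_result.append(date)
--     for i in text:
--         if '<strong>' in i:
--             description = i.strip('<strong>').strip('</')
--             inform_for_result.append(description)
--     return inform_for_result
-- ===== SOURCE B (Python) =====
-- def find_needed_line_2(text):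
--     # single backward pass: carry the following line as state, no index arithmetic
--     titles, dates, descriptions = [], [], []
--     following = None
--     for cur in reversed(text):
--         if '<strong>' in cur:
--             descriptions.append(cur.strip('<strong>').strip('</'))
--         if "<span class='challenge-date'>" in cur:
--             dates.append(following)
--         if '<title>' in cur:
--             titles.append(cur.strip('<title>').strip('</'))
--         following = cur
--     titles.reverse()
--     dates.reverse()
--     descriptions.reverse()
--     return titles + dates + descriptions
-- ===== Notes on version B (the rewrite author's own statement) =====
-- stated objective: alternative
-- what changed: replaces A's three forward scans (one indexing text[i+1] via range(len(text))) by a single BACKWARD traversal that carries the following line as loop state, so the lookahead needs no indexing, and builds the three buckets in reverse before reversing them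
import Mathlib
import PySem

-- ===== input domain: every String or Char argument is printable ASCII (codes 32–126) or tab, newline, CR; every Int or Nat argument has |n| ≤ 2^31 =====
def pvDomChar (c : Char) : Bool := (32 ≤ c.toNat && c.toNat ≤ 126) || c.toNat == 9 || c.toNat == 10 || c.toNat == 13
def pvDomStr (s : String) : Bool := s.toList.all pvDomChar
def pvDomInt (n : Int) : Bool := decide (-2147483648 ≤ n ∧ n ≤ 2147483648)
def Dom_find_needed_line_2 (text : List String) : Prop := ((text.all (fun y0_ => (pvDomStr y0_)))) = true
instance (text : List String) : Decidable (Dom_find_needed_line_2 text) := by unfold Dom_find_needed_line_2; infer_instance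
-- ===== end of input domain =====

-- B replaces A's three forward scans (one of which indexes text[i+1]) by a single
-- BACKWARD traversal carrying the following line as loop state (no indexing),
-- filling three buckets in reverse and reversing them at the end (same cost).

-- ===== PORT A =====
-- literal transliteration of A: three scans appending into one list
def find_needed_line_2 (text : List String) : List String :=
  let r1 := text.foldl (fun acc i =>
    if PySem.Str.isIn "<title>" i then
      acc ++ [PySem.Str.stripChars (PySem.Str.stripChars i "<title>") "</"]
    else acc) []
  let r2 := (PySem.List.pyRange 0 (text.length : Int) 1).foldl (fun acc i =>
    if PySem.Str.isIn "<span class='challenge-date'>" (PySem.List.pyGetD text i "") then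
      acc ++ [PySem.List.pyGetD text (i + 1) ""]   -- text[i+1]; Pre_ keeps i+1 in range
    else acc) r1
  text.foldl (fun acc i =>
    if PySem.Str.isIn "<strong>" i then
      acc ++ [PySem.Str.stripChars (PySem.Str.stripChars i "<strong>") "</"]
    else acc) r2

-- ===== PORT B =====
-- literal transliteration of B: one reversed loop with lookahead state, three buckets
-- state = (titles, dates, descriptions, following); Python's 'following = None' start is
-- Option String; 'dates.append(following)' is ported with .getD "" (inside Pre_ the
-- branch only fires with following = some _, so this is exact on the admitted inputs)
def find_needed_line_2_alt (text : List String) : List String :=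
  let st := text.reverse.foldl
    (fun (st : List String × List String × List String × Option String) cur =>
      ((if PySem.Str.isIn "<title>" cur then
          st.1 ++ [PySem.Str.stripChars (PySem.Str.stripChars cur "<title>") "</"] else st.1),
       (if PySem.Str.isIn "<span class='challenge-date'>" cur then
          st.2.1 ++ [st.2.2.2.getD ""] else st.2.1),
       (if PySem.Str.isIn "<strong>" cur then
          st.2.2.1 ++ [PySem.Str.stripChars (PySem.Str.stripChars cur "<strong>") "</"] else st.2.2.1),
       some cur))
    ([], [], [], none)
  st.1.reverse ++ st.2.1.reverse ++ st.2.2.1.reverse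

-- ===== PRECONDITION & SPEC =====
-- Pre_ excludes exactly the inputs on which A raises IndexError: a line containing the
-- challenge-date marker being the LAST line, so text[i+1] is out of range.
def Pre_find_needed_line_2 (text : List String) : Prop :=
  PySem.Str.isIn "<span class='challenge-date'>" (text.getLastD "") = false
instance (text : List String) : Decidable (Pre_find_needed_line_2 text) := by
  unfold Pre_find_needed_line_2; infer_instance

def pvWitness_find_needed_line_2 : List String :=
  ["<title>My Run</title>", "<span class='challenge-date'>", "May 5, 2021", "<strong>desc here</strong>"]

def Spec_find_needed_line_2 (text : List String) (out : List String) : Prop := out = find_needed_line_2_alt text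
instance (text : List String) (out : List String) : Decidable (Spec_find_needed_line_2 text out) := by unfold Spec_find_needed_line_2; infer_instance

-- ===== CLAIM (what is proved, stated in full; the proofs are below) =====
def Claim_equal_find_needed_line_2 : Prop := ∀ (text : List String), Dom_find_needed_line_2 text → Pre_find_needed_line_2 text → Spec_find_needed_line_2 text (find_needed_line_2 text)

-- ===== LEMMAS AND PROOFS =====

-- the cons-form of the date list: for each marker line, the line after it (or "" at the end)
def pvDatesGo (text : List String) : List String :=
  match text with
  | [] => []
  | cur :: rest =>
    if PySem.Str.isIn "<span class='challenge-date'>" cur then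
      rest.headD "" :: pvDatesGo rest
    else pvDatesGo rest

theorem getD_eq_headD_drop {a : Type} (l : List a) (n : Nat) (d : a) :
    l.getD n d = (l.drop n).headD d := by
  induction l generalizing n with
  | nil => simp
  | cons x xs ih =>
    cases n with
    | zero => simp
    | succ m => exact ih m

theorem filter_map_map {a b c : Type} (l : List a) (g : a -> b) (p : b -> Bool) (F : b -> c) :
    ((l.map g).filter p).map F = (l.filter (fun x => p (g x))).map (fun x => F (g x)) := by
  induction l with
  | nil => simp
  | cons x xs ih =>
    simp only [List.map_cons, List.filter_cons]
    by_cases h : p (g x) <;> simp [h, ih]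

-- A's range-indexed date scan, rewritten in enumerate form
theorem filter_map_fst_enum (text : List String) (P : String -> Bool) (f : Int -> String) :
    (((PySem.List.enumerate text 0).filter (fun p => P p.2)).map (fun p => f p.1))
      = (((PySem.List.pyRange 0 (text.length : Int) 1).filter
            (fun j => P (PySem.List.pyGetD text j ""))).map (fun j => f j)) := by
  rw [PySem.List.enumerate_eq_map_pyRange text "", filter_map_map]
  simp

-- the enumerate form of the date scan equals the cons-form pvDatesGo
theorem datesGo_eq_enum (full : List String) :
    forall (rest : List String) (k : Nat), full.drop k = rest ->
    (((PySem.List.enumerate rest (k : Int)).filter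
        (fun p => PySem.Str.isIn "<span class='challenge-date'>" p.2)).map
        (fun p => PySem.List.pyGetD full (p.1 + 1) ""))
      = pvDatesGo rest := by
  intro rest
  induction rest with
  | nil => intro k _; simp [PySem.List.enumerate_nil, pvDatesGo]
  | cons cur r ih =>
    intro k hk
    have hdrop : full.drop (k + 1) = r := by
      have := congrArg (List.drop 1) hk
      simpa [List.drop_drop, Nat.add_comm] using this
    have hcast : ((k : Int) + 1) = (((k + 1 : Nat)) : Int) := by push_cast; ring
    have hget : PySem.List.pyGetD full ((k : Int) + 1) "" = r.headD "" := by
      rw [hcast, PySem.List.pyGetD_natCast, getD_eq_headD_drop, hdrop]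
    rw [PySem.List.enumerate_cons]
    simp only [List.filter_cons, pvDatesGo]
    by_cases h : PySem.Str.isIn "<span class='challenge-date'>" cur
    · simp only [h, if_true, List.map_cons, hget]
      rw [hcast, ih (k + 1) hdrop]
    · simp only [h, if_false, Bool.false_eq_true]
      rw [hcast, ih (k + 1) hdrop]

-- the backward loop of B, characterised: three reversed buckets plus the head as lookahead
theorem altFoldr_eq (text : List String) :
    text.reverse.foldl
      (fun (st : List String × List String × List String × Option String) cur =>
        ((if PySem.Str.isIn "<title>" cur then
            st.1 ++ [PySem.Str.stripChars (PySem.Str.stripChars cur "<title>") "</"] else st.1),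
         (if PySem.Str.isIn "<span class='challenge-date'>" cur then
            st.2.1 ++ [st.2.2.2.getD ""] else st.2.1),
         (if PySem.Str.isIn "<strong>" cur then
            st.2.2.1 ++ [PySem.Str.stripChars (PySem.Str.stripChars cur "<strong>") "</"] else st.2.2.1),
         some cur))
      ([], [], [], none)
    = (((text.filter (fun s => PySem.Str.isIn "<title>" s)).map
          (fun s => PySem.Str.stripChars (PySem.Str.stripChars s "<title>") "</")).reverse,
       (pvDatesGo text).reverse,
       ((text.filter (fun s => PySem.Str.isIn "<strong>" s)).map
          (fun s => PySem.Str.stripChars (PySem.Str.stripChars s "<strong>") "</")).reverse,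
       text.head?) := by
  simp only [List.foldl_reverse]
  induction text with
  | nil => rfl
  | cons cur rest ih =>
    simp only [List.foldr_cons, ih, pvDatesGo, List.filter_cons, List.head?_cons]
    refine Prod.ext ?_ (Prod.ext ?_ (Prod.ext ?_ rfl))
    · by_cases h : PySem.Str.isIn "<title>" cur <;>
        simp only [h, if_true, if_false, Bool.false_eq_true, List.map_cons, List.reverse_cons]
    · by_cases h : PySem.Str.isIn "<span class='challenge-date'>" cur <;>
        simp only [h, if_true, if_false, Bool.false_eq_true, List.reverse_cons,
          List.headD_eq_head?]
    · by_cases h : PySem.Str.isIn "<strong>" cur <;>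
        simp only [h, if_true, if_false, Bool.false_eq_true, List.map_cons, List.reverse_cons]

theorem find_needed_line_2_alt_eq (text : List String) :
    find_needed_line_2_alt text = find_needed_line_2 text := by
  unfold find_needed_line_2_alt find_needed_line_2
  simp only [PySem.List.foldl_append_if, List.nil_append]
  rw [altFoldr_eq text]
  simp only [List.reverse_reverse]
  have hD := datesGo_eq_enum text text 0 (by simp)
  simp only [Nat.cast_zero] at hD
  rw [filter_map_fst_enum text
        (fun s => PySem.Str.isIn "<span class='challenge-date'>" s)
        (fun j => PySem.List.pyGetD text (j + 1) "")] at hD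
  rw [← hD]

-- ===== VERDICT (by name: the statement is the Claim_ definition above) =====
theorem find_needed_line_2_spec : Claim_equal_find_needed_line_2 := by
  intro text _ _
  unfold Spec_find_needed_line_2
  exact (find_needed_line_2_alt_eq text).symm
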